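-- pv_equiv track=rewrite | github.com/NewsEye/event-detection | event-detection-qa/modules/pipe.py | iob2bioes
-- ===== SOURCE A (Python) =====
-- def iob2bioes(tags):
--
--     new_tags = []
--     for i, tag in enumerate(tags):
--         if tag == 'O':
--             new_tags.append(tag)
--         else:
--             split = tag.split('-')[0]
--             if split == 'B':
--                 if i + 1 != len(tags) and tags[i + 1].split('-')[0] == 'I':
--                     new_tags.append(tag)
--                 else:
--                     new_tags.append(tag.replace('B-', 'S-'))
--             elif split == 'I':
--                 if i + 1 < len(tags) and tags[i + 1].split('-')[0] == 'I':
--                     new_tags.append(tag)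
--                 else:
--                     new_tags.append(tag.replace('I-', 'E-'))
--             else:
--                 import pdb
--                 pdb.set_trace()
--                 raise TypeError("Invalid IOB format.")
--     return new_tags
-- ===== SOURCE B (Python) =====
-- def iob2bioes(tags):
--     # Backward pass: walk the tags in reverse carrying a flag that says
--     # whether the tag just seen (i.e. the successor in original order) has
--     # prefix 'I'; no lookahead indexing and no pending buffer is needed.
--     # The output is built in reverse and flipped once at the end.
--     out = []
--     next_is_inside = False
--     for tag in reversed(tags):
--         if tag == 'O':
--             out.append(tag)
--             next_is_inside = False
--             continue
--         prefix = tag.split('-')[0]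
--         if prefix == 'B':
--             out.append(tag if next_is_inside else tag.replace('B-', 'S-'))
--         elif prefix == 'I':
--             out.append(tag if next_is_inside else tag.replace('I-', 'E-'))
--         else:
--             raise TypeError("Invalid IOB format.")
--         next_is_inside = prefix == 'I'
--     out.reverse()
--     return out
-- ===== Notes on version B (the rewrite author's own statement) =====
-- stated objective: alternative
-- what changed: Replaced A's forward enumerate loop with tags[i+1] lookahead indexing by a backward traversal over reversed(tags) that carries a single 'successor has prefix I' boolean flag, builds the output back-to-front and reverses it once at the end.
import Mathlib
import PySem

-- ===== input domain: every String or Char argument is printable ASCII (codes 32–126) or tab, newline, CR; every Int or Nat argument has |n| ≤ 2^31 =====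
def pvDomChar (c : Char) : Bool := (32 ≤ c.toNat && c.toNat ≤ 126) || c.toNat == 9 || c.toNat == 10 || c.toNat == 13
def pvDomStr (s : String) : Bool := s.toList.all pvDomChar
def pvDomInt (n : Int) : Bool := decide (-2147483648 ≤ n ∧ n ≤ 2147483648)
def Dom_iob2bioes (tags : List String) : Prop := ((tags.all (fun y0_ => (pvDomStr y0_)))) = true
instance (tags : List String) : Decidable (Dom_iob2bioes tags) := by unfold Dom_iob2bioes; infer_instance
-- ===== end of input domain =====

-- B replaces A's forward enumerate loop with tags[i+1] lookahead by a backward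
-- traversal carrying a 'successor has prefix I' flag, building the output in
-- reverse and flipping it once at the end.


-- shared helper: the Python expression tag.split('-')[0], appearing verbatim in both A and B
def pvPrefix (t : String) : String := ((PySem.Str.split? t "-").getD []).headD ""

-- ===== PORT A =====
-- the final 'else' branch raises TypeError in Python; it is excluded by Pre_ below,
-- the port appends the tag unchanged there (value never claimed)
def iob2bioes (tags : List String) : List String :=
  (PySem.List.enumerate tags).foldl
    (fun new_tags it =>
      let i := it.1
      let tag := it.2
      if tag == "O" then new_tags ++ [tag]
      else
        let split := pvPrefix tag
        if split == "B" then
          if (i + 1 != (tags.length : Int)) && (pvPrefix ((PySem.List.pyGet? tags (i + 1)).getD "") == "I") then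
            new_tags ++ [tag]
          else
            new_tags ++ [PySem.Str.replace tag "B-" "S-"]
        else if split == "I" then
          if (i + 1 < (tags.length : Int)) && (pvPrefix ((PySem.List.pyGet? tags (i + 1)).getD "") == "I") then
            new_tags ++ [tag]
          else
            new_tags ++ [PySem.Str.replace tag "I-" "E-"]
        else new_tags ++ [tag])
    []

-- ===== PORT B =====
-- one step of B's loop over reversed(tags); state = (out, next_is_inside);
-- the raising branch (excluded by Pre_) appends the tag unchanged
def pvStepB (st : List String × Bool) (tag : String) : List String × Bool :=
  if tag == "O" then (st.1 ++ [tag], false)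
  else
    let prefix_ := pvPrefix tag
    if prefix_ == "B" then
      (st.1 ++ [if st.2 then tag else PySem.Str.replace tag "B-" "S-"], prefix_ == "I")
    else if prefix_ == "I" then
      (st.1 ++ [if st.2 then tag else PySem.Str.replace tag "I-" "E-"], prefix_ == "I")
    else (st.1 ++ [tag], prefix_ == "I")

def iob2bioes_alt (tags : List String) : List String :=
  (tags.reverse.foldl pvStepB ([], false)).1.reverse

-- ===== PRECONDITION & SPEC =====
-- Pre_ excludes exactly the inputs on which A raises TypeError (after pdb.set_trace):
-- some tag other than 'O' whose part before the first '-' is neither 'B' nor 'I'.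
def Pre_iob2bioes (tags : List String) : Prop :=
  (tags.all (fun t => t == "O" || pvPrefix t == "B" || pvPrefix t == "I")) = true
instance (tags : List String) : Decidable (Pre_iob2bioes tags) := by unfold Pre_iob2bioes; infer_instance

def pvWitness_iob2bioes : List String := ["B-PER", "I-PER", "O", "B-LOC"]

def Spec_iob2bioes (tags : List String) (out : List String) : Prop := out = iob2bioes_alt tags
instance (tags : List String) (out : List String) : Decidable (Spec_iob2bioes tags out) := by unfold Spec_iob2bioes; infer_instance

-- ===== CLAIM (what is proved, stated in full; the proofs are below) =====
def Claim_equal_iob2bioes : Prop := ∀ (tags : List String), Dom_iob2bioes tags → Pre_iob2bioes tags → Spec_iob2bioes tags (iob2bioes tags)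

-- ===== LEMMAS AND PROOFS =====

-- proof-only canonical form: each tag finalized against its successor
def pvFinalize (tag : String) (nxt : Option String) : String :=
  if tag == "O" then tag
  else
    let prefix_ := pvPrefix tag
    let nextIsInside := match nxt with
      | some n => pvPrefix n == "I"
      | none => false
    if prefix_ == "B" then
      if nextIsInside then tag else PySem.Str.replace tag "B-" "S-"
    else if prefix_ == "I" then
      if nextIsInside then tag else PySem.Str.replace tag "I-" "E-"
    else tag

def pvSpecMap : List String → List String
  | [] => []
  | t :: rest => pvFinalize t rest.head? :: pvSpecMap rest

def pvNextI (o : Option String) : Bool :=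
  match o with
  | some n => pvPrefix n == "I"
  | none => false

theorem pvStepB_eq (t : String) (rest : List String) (out : List String) :
    pvStepB (out, pvNextI rest.head?) t
      = (out ++ [pvFinalize t rest.head?], pvNextI (some t)) := by
  by_cases hO : t = "O"
  · subst hO
    have hpre : pvPrefix "O" = "O" := by decide
    simp [pvStepB, pvFinalize, pvNextI, hpre]
  · simp only [pvStepB, pvFinalize, pvNextI, beq_iff_eq, hO, if_false]
    cases rest with
    | nil => split_ifs <;> rfl
    | cons n r => split_ifs <;> rfl

theorem pvFoldB (tags : List String) :
    tags.reverse.foldl pvStepB ([], false)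
      = ((pvSpecMap tags).reverse, pvNextI tags.head?) := by
  rw [List.foldl_reverse]
  induction tags with
  | nil => rfl
  | cons t rest ih =>
    rw [List.foldr_cons, ih]
    have h := pvStepB_eq t rest (pvSpecMap rest).reverse
    rw [h]
    simp [pvSpecMap, pvNextI]

theorem pvAlt_eq_spec (tags : List String) : iob2bioes_alt tags = pvSpecMap tags := by
  unfold iob2bioes_alt
  rw [pvFoldB]
  simp

theorem pvA_fold (tags pre suf : List String) (acc : List String)
    (h : tags = pre ++ suf) :
    (PySem.List.enumerate suf (pre.length : Int)).foldl
      (fun new_tags it =>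
        let i := it.1
        let tag := it.2
        if tag == "O" then new_tags ++ [tag]
        else
          let split := pvPrefix tag
          if split == "B" then
            if (i + 1 != (tags.length : Int)) && (pvPrefix ((PySem.List.pyGet? tags (i + 1)).getD "") == "I") then
              new_tags ++ [tag]
            else
              new_tags ++ [PySem.Str.replace tag "B-" "S-"]
          else if split == "I" then
            if (i + 1 < (tags.length : Int)) && (pvPrefix ((PySem.List.pyGet? tags (i + 1)).getD "") == "I") then
              new_tags ++ [tag]
            else
              new_tags ++ [PySem.Str.replace tag "I-" "E-"]
          else new_tags ++ [tag])
      acc = acc ++ pvSpecMap suf := by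
  induction suf generalizing pre acc with
  | nil => simp [pvSpecMap]
  | cons t rest ih =>
    rw [PySem.List.enumerate_cons, List.foldl_cons]
    have hlen : tags.length = pre.length + 1 + rest.length := by
      subst h; simp; omega
    have hnext : PySem.List.pyGet? tags ((pre.length : Int) + 1) = rest.head? := by
      subst h
      have : ((pre.length : Int) + 1) = ((pre.length + 1 : Nat) : Int) := by push_cast; ring
      rw [this, PySem.List.pyGet?_natCast]
      cases rest with
      | nil => simp
      | cons n r => simp
    have hstep :
        (if t == "O" then acc ++ [t]
         else
           let split := pvPrefix t
           if split == "B" then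
             if ((pre.length : Int) + 1 != (tags.length : Int)) && (pvPrefix ((PySem.List.pyGet? tags ((pre.length : Int) + 1)).getD "") == "I") then
               acc ++ [t]
             else acc ++ [PySem.Str.replace t "B-" "S-"]
           else if split == "I" then
             if ((pre.length : Int) + 1 < (tags.length : Int)) && (pvPrefix ((PySem.List.pyGet? tags ((pre.length : Int) + 1)).getD "") == "I") then
               acc ++ [t]
             else acc ++ [PySem.Str.replace t "I-" "E-"]
           else acc ++ [t]) = acc ++ [pvFinalize t rest.head?] := by
      rw [hnext]
      cases rest with
      | nil =>
        have h1 : ((pre.length : Int) + 1 != (tags.length : Int)) = false := by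
          simp [hlen]
        have h2 : ¬ ((pre.length : Int) + 1 < (tags.length : Int)) := by
          simp [hlen]
        simp [pvFinalize, h1, h2]
        split_ifs <;> rfl
      | cons n r =>
        have h1 : ((pre.length : Int) + 1 != (tags.length : Int)) = true := by
          simp [hlen]; omega
        have h2 : ((pre.length : Int) + 1 < (tags.length : Int)) := by
          simp [hlen]
        simp only [pvFinalize, h1, h2, Bool.true_and, decide_true, List.head?_cons,
          Option.getD_some]
        split_ifs <;> rfl
    rw [hstep]
    have h' : tags = (pre ++ [t]) ++ rest := by simp [h]
    have hthis := ih (pre ++ [t]) (acc ++ [pvFinalize t rest.head?]) h'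
    rw [show (((pre ++ [t]).length : Nat) : Int) = (pre.length : Int) + 1 from by simp] at hthis
    rw [hthis, pvSpecMap]
    simp

theorem pvA_eq_spec (tags : List String) : iob2bioes tags = pvSpecMap tags := by
  have := pvA_fold tags [] tags [] (by simp)
  simpa [iob2bioes] using this

-- ===== VERDICT (by name: the statement is the Claim_ definition above) =====
theorem iob2bioes_spec : Claim_equal_iob2bioes := by
  intro tags _ _
  unfold Spec_iob2bioes
  rw [pvA_eq_spec, pvAlt_eq_spec]
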